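-- pv_equiv track=rewrite | github.com/techminds-unipd/docs | .github/workflows/indice_gulpease.py | get_nested_parentheses
-- ===== SOURCE A (Python) =====
-- def get_nested_parentheses(string): # https://stackoverflow.com/questions/4284991/parsing-nested-parentheses-in-python-grab-content-by-level#4285211
--     stack = []
--     for i, c in enumerate(string):
--         if c == '(':
--             stack.append(i)
--         elif c == ')' and stack:
--             start = stack.pop()
--             yield string[start + 1: i]
-- ===== SOURCE B (Python) =====
-- def get_nested_parentheses(string):
--     n = len(string)
--
--     def group(start):
--         # Parse the body of a group whose '(' sits just before `start`.
--         # Yields nested groups first (post-order), then this group's content;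
--         # returns the index just past the matching ')' (n if unmatched).
--         i = start
--         while i < n:
--             c = string[i]
--             if c == '(':
--                 i = yield from group(i + 1)
--             elif c == ')':
--                 yield string[start:i]
--                 return i + 1
--             else:
--                 i += 1
--         return i
--
--     i = 0
--     while i < n:
--         if string[i] == '(':
--             i = yield from group(i + 1)
--         else:
--             i += 1
-- ===== Notes on version B (the rewrite author's own statement) =====
-- stated objective: alternative
-- what changed: Replaced A's single-pass loop with an explicit stack of '(' indices by a recursive-descent parser whose post-order recursion (nested groups yielded before their enclosing group) reproduces the innermost-closing-first order.
import Mathlib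
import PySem

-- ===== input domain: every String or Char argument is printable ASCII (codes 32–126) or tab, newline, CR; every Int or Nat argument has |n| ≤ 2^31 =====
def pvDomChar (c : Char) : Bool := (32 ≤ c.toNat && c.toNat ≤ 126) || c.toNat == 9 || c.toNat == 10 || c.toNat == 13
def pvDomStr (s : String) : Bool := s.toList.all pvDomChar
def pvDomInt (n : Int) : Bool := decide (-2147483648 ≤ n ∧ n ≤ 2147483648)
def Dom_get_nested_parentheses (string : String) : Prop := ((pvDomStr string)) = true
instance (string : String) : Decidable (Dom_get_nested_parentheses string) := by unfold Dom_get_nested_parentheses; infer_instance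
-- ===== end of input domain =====

-- B replaces A's explicit index-stack loop by a recursive-descent parser (same result, same cost; objective: alternative decomposition).

-- ===== PORT A =====
-- one iteration of A's for-loop: state = (stack of '(' indices, yields so far)
def pvStepA (string : String) (st : List Int × List String) (ic : Int × Char) : List Int × List String :=
  if ic.2 = '(' then (ic.1 :: st.1, st.2)
  else if ic.2 = ')' then
    match st.1 with
    | [] => st
    | start :: rest => (rest, st.2 ++ [PySem.Str.slice string (some (start + 1)) (some ic.1)])
  else st

def get_nested_parentheses (string : String) : List String :=
  ((PySem.List.enumerate string.toList 0).foldl (pvStepA string) ([], [])).2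

-- ===== PORT B =====
-- Source B's inner `group(start)` (its while-loop as recursion on `i`; fuel bounds the remaining scan):
-- returns (the yields of this group, the index just past its ')' — or `i` at end of string)
def pvGroupB (string : String) : Nat → Nat → Nat → List String × Nat
  | 0, _, i => ([], i)
  | f + 1, start, i =>
    if h : i < string.toList.length then
      let c := string.toList[i]
      if c = '(' then
        let (ys1, j) := pvGroupB string f (i + 1) (i + 1)
        let (ys2, k) := pvGroupB string f start j
        (ys1 ++ ys2, k)
      else if c = ')' then
        ([PySem.Str.slice string (some (start : Int)) (some (i : Int))], i + 1)
      else
        pvGroupB string f start (i + 1)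
    else ([], i)

-- Source B's top-level while-loop
def pvTopB (string : String) : Nat → Nat → List String
  | 0, _ => []
  | f + 1, i =>
    if h : i < string.toList.length then
      if string.toList[i] = '(' then
        let (ys, j) := pvGroupB string f (i + 1) (i + 1)
        ys ++ pvTopB string f j
      else
        pvTopB string f (i + 1)
    else []

def get_nested_parentheses_alt (string : String) : List String :=
  pvTopB string (string.toList.length + 1) 0

-- ===== PRECONDITION & SPEC =====
def Spec_get_nested_parentheses (string : String) (out : List String) : Prop := out = get_nested_parentheses_alt string
instance (string : String) (out : List String) : Decidable (Spec_get_nested_parentheses string out) := by unfold Spec_get_nested_parentheses; infer_instance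

-- ===== CLAIM (what is proved, stated in full; the proofs are below) =====
def Claim_equal_get_nested_parentheses : Prop := ∀ (string : String), Dom_get_nested_parentheses string → Spec_get_nested_parentheses string (get_nested_parentheses string)

-- ===== LEMMAS AND PROOFS =====

-- the scan never moves backwards
theorem pvGroupB_le (string : String) (f start i : Nat) : i ≤ (pvGroupB string f start i).2 := by
  induction f generalizing start i with
  | zero => simp [pvGroupB]
  | succ f ih =>
    simp only [pvGroupB]
    split
    · split
      · have h1 := ih (i + 1) (i + 1)
        have h2 := ih start (pvGroupB string f (i + 1) (i + 1)).2
        omega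
      · split
        · omega
        · have := ih start (i + 1); omega
    · omega

-- A's fold over the tail `enumerate (drop i) i`, with B's group `p+1` open on top of the stack,
-- emits that group's yields and continues with the rest of the stack from where the group ends.
theorem pvScanA_group (string : String) (f : Nat) :
    ∀ (i p : Nat) (rest : List Int) (out : List String),
      string.toList.length - i < f →
      ((PySem.List.enumerate (string.toList.drop i) i).foldl (pvStepA string) ((p : Int) :: rest, out)).2 =
      ((PySem.List.enumerate (string.toList.drop (pvGroupB string f (p + 1) i).2)
          (pvGroupB string f (p + 1) i).2).foldl (pvStepA string)
        (rest, out ++ (pvGroupB string f (p + 1) i).1)).2 := by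
  induction f with
  | zero => intro i p rest out h; omega
  | succ f ih =>
    intro i p rest out h
    by_cases hi : i < string.toList.length
    · rw [List.drop_eq_getElem_cons hi, PySem.List.enumerate_cons, List.foldl_cons]
      simp only [pvGroupB, dif_pos hi]
      by_cases hc : string.toList[i] = '('
      · simp only [if_pos hc]
        have step : pvStepA string ((p : Int) :: rest, out) ((i : Nat), string.toList[i]) =
            ((i : Int) :: (p : Int) :: rest, out) := by
          simp [pvStepA, hc]
        rw [step, show ((i : Int) + 1) = (((i + 1 : Nat)) : Int) by push_cast; ring]
        have h1 : string.toList.length - (i + 1) < f := by omega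
        rw [ih (i + 1) i ((p : Int) :: rest) out h1]
        have hj : i + 1 ≤ (pvGroupB string f (i + 1) (i + 1)).2 := pvGroupB_le string f (i + 1) (i + 1)
        have h2 : string.toList.length - (pvGroupB string f (i + 1) (i + 1)).2 < f := by omega
        rw [ih (pvGroupB string f (i + 1) (i + 1)).2 p rest (out ++ (pvGroupB string f (i + 1) (i + 1)).1) h2]
        simp
      · by_cases hc2 : string.toList[i] = ')'
        · simp only [if_neg hc, if_pos hc2]
          have step : pvStepA string ((p : Int) :: rest, out) ((i : Nat), string.toList[i]) =
              (rest, out ++ [PySem.Str.slice string (some ((p : Int) + 1)) (some (i : Int))]) := by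
            simp [pvStepA, hc2]
          rw [step, show ((p : Int) + 1) = (((p + 1 : Nat)) : Int) by push_cast; ring,
            show ((i : Int) + 1) = (((i + 1 : Nat)) : Int) by push_cast; ring]
        · simp only [if_neg hc, if_neg hc2]
          have step : pvStepA string ((p : Int) :: rest, out) ((i : Nat), string.toList[i]) =
              ((p : Int) :: rest, out) := by
            simp [pvStepA, hc, hc2]
          rw [step, show ((i : Int) + 1) = (((i + 1 : Nat)) : Int) by push_cast; ring]
          exact ih (i + 1) p rest out (by omega)
    · have hd : string.toList.drop i = [] := List.drop_eq_nil_of_le (by omega)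
      simp only [pvGroupB, dif_neg hi, hd, PySem.List.enumerate_nil, List.foldl_nil, List.append_nil]


-- A's fold from position i with an empty stack yields exactly Source B's top-level loop from i.
theorem pvScanA_top (string : String) (f : Nat) :
    ∀ (i : Nat) (out : List String),
      string.toList.length - i < f →
      ((PySem.List.enumerate (string.toList.drop i) i).foldl (pvStepA string) ([], out)).2 =
      out ++ pvTopB string f i := by
  induction f with
  | zero => intro i out h; omega
  | succ f ih =>
    intro i out h
    by_cases hi : i < string.toList.length
    · rw [List.drop_eq_getElem_cons hi, PySem.List.enumerate_cons, List.foldl_cons]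
      simp only [pvTopB, dif_pos hi]
      by_cases hc : string.toList[i] = '('
      · simp only [if_pos hc]
        have step : pvStepA string ([], out) ((i : Nat), string.toList[i]) = ([(i : Int)], out) := by
          simp [pvStepA, hc]
        rw [step, show ((i : Int) + 1) = (((i + 1 : Nat)) : Int) by push_cast; ring]
        have h1 : string.toList.length - (i + 1) < f := by omega
        rw [pvScanA_group string f (i + 1) i [] out h1]
        have hj : i + 1 ≤ (pvGroupB string f (i + 1) (i + 1)).2 := pvGroupB_le string f (i + 1) (i + 1)
        rw [ih (pvGroupB string f (i + 1) (i + 1)).2 (out ++ (pvGroupB string f (i + 1) (i + 1)).1) (by omega)]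
        simp
      · simp only [if_neg hc]
        have step : pvStepA string ([], out) ((i : Nat), string.toList[i]) = ([], out) := by
          simp [pvStepA, hc]
        rw [step, show ((i : Int) + 1) = (((i + 1 : Nat)) : Int) by push_cast; ring]
        exact ih (i + 1) out (by omega)
    · have hd : string.toList.drop i = [] := List.drop_eq_nil_of_le (by omega)
      simp only [pvTopB, dif_neg hi, hd, PySem.List.enumerate_nil, List.foldl_nil, List.append_nil]

-- ===== VERDICT (by name: the statement is the Claim_ definition above) =====
theorem get_nested_parentheses_spec : Claim_equal_get_nested_parentheses := by
  intro string _
  unfold Spec_get_nested_parentheses get_nested_parentheses get_nested_parentheses_alt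
  have := pvScanA_top string (string.toList.length + 1) 0 [] (by omega)
  simpa using this
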